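-- pv_equiv track=rewrite | github.com/LucaMawyin/COMPSCI_1MD3 | Homework/Midterm_Practice/isNum.py | get_course_title2
-- ===== SOURCE A (Python) =====
-- def get_course_title2 (name):
--     new_name = ""
--     word = ""
--     count = 0
--
--     for char in name:
--         if char == " ":
--             count = 0
--             new_name += word + " "
--
--             word = ""
--         else:
--             if count < 5:
--                 word += char
--
--             elif count == 5:
--                 word += ". "
--             count += 1
--
--     return new_name + word
-- ===== SOURCE B (Python) =====
-- def get_course_title2(name):
--     return " ".join(w if len(w) <= 5 else w[:5] + ". " for w in name.split(" "))
-- ===== Notes on version B (the rewrite author's own statement) =====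
-- stated objective: simpler
-- what changed: Replaces A's per-character state machine (word buffer, running count, manual concatenation) with a one-line per-word transform: split the string on single spaces, truncate each word longer than 5 to its first 5 chars followed by a period and a space, and join the words back with spaces.
import Mathlib
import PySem

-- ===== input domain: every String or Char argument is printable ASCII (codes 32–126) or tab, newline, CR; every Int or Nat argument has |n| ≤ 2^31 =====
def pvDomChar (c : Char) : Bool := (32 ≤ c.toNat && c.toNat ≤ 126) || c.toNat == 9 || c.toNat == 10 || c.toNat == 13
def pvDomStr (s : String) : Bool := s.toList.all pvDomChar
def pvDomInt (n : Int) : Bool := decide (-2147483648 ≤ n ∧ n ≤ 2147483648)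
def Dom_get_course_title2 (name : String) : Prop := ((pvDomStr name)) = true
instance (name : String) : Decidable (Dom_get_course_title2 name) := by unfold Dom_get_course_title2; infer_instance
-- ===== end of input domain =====

-- B replaces A's per-character state machine (word buffer + count) by a per-word
-- transform over name.split(" ") joined back with " " (objective: simpler).
-- A is total on strings, so there is no Pre_.

-- ===== PORT A =====
-- state = (new_name, word, count), one step per character, branches in A's order
def get_course_title2 (name : String) : String :=
  let r := name.toList.foldl
    (fun (st : List Char × List Char × Int) char =>
      if char = ' ' then
        (st.1 ++ st.2.1 ++ [' '], [], 0)
      else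
        let word :=
          if st.2.2 < 5 then st.2.1 ++ [char]
          else if st.2.2 = 5 then st.2.1 ++ ". ".toList
          else st.2.1
        (st.1, word, st.2.2 + 1))
    ([], [], (0 : Int))
  String.ofList (r.1 ++ r.2.1)

-- ===== PORT B =====
-- name.split(" ") = List.splitOn ' ' (empty pieces preserved, exactly Python's
-- str.split with an explicit separator); " ".join = PySem.Chars.join [' '].
def get_course_title2_alt (name : String) : String :=
  String.ofList (PySem.Chars.join [' ']
    ((name.toList.splitOn ' ').map (fun w =>
      if PySem.Chars.len w ≤ 5 then w
      else PySem.Chars.slice w none (some 5) ++ ". ".toList)))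

-- ===== PRECONDITION & SPEC =====
def Spec_get_course_title2 (name : String) (out : String) : Prop := out = get_course_title2_alt name
instance (name : String) (out : String) : Decidable (Spec_get_course_title2 name out) := by unfold Spec_get_course_title2; infer_instance

-- ===== CLAIM (what is proved, stated in full; the proofs are below) =====
def Claim_equal_get_course_title2 : Prop := ∀ (name : String), Dom_get_course_title2 name → Spec_get_course_title2 name (get_course_title2 name)

-- ===== LEMMAS AND PROOFS =====

-- the per-word transform, on the list side
def pvT (w : List Char) : List Char :=
  if w.length ≤ 5 then w else w.take 5 ++ ". ".toList

-- A's step function (named for the proofs)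
def pvStep (st : List Char × List Char × Int) (char : Char) : List Char × List Char × Int :=
  if char = ' ' then
    (st.1 ++ st.2.1 ++ [' '], [], 0)
  else
    let word :=
      if st.2.2 < 5 then st.2.1 ++ [char]
      else if st.2.2 = 5 then st.2.1 ++ ". ".toList
      else st.2.1
    (st.1, word, st.2.2 + 1)

lemma pvStep_word (w : List Char) (c : Char) (hc : ¬ c = ' ') (nn : List Char) :
    pvStep (nn, pvT w, (w.length : Int)) c
      = (nn, pvT (w ++ [c]), ((w ++ [c]).length : Int)) := by
  simp only [pvStep, hc, if_false, pvT]
  by_cases h5 : w.length ≤ 5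
  · rcases Nat.lt_or_ge w.length 5 with h | h
    · simp [show (w.length : Int) < 5 by exact_mod_cast h,
        show w.length + 1 ≤ 5 from h, List.length_append]
      omega
    · have h5' : w.length = 5 := le_antisymm h5 h
      -- take 5 (w ++ [c]) = w when |w| = 5
      simp [h5', List.length_append, List.take_append_of_le_length (by omega)]
  · have hlt : ¬ ((w.length : Int) < 5) := by exact_mod_cast by omega
    have ht : (w ++ [c]).take 5 = w.take 5 :=
      List.take_append_of_le_length (by omega)
    simp [hlt, show ¬ ((w.length : Int) = 5) by exact_mod_cast by omega,
      List.length_append, ht, show ¬ w.length + 1 ≤ 5 by omega, h5]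

lemma pv_splitOnP_ne_nil (cs : List Char) : cs.splitOnP (· == ' ') ≠ [] :=
  List.splitOnP_ne_nil _ cs

-- loop invariant: running A's loop from (nn, pvT w, |w|) appends the rendering
-- of the remaining words, the first of which is continued by w
lemma pv_loop (cs : List Char) : ∀ (nn w : List Char),
    (let r := cs.foldl pvStep (nn, pvT w, (w.length : Int)); r.1 ++ r.2.1)
      = nn ++ PySem.Chars.join [' ']
          (((cs.splitOnP (· == ' ')).modifyHead (w ++ ·)).map pvT) := by
  induction cs with
  | nil =>
      intro nn w
      simp [List.splitOnP_nil, PySem.Chars.join_singleton]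
  | cons c cs ih =>
      intro nn w
      by_cases hc : c = ' '
      · subst hc
        obtain ⟨h, t, ht⟩ := List.exists_cons_of_ne_nil (pv_splitOnP_ne_nil cs)
        have step : pvStep (nn, pvT w, (w.length : Int)) ' '
            = (nn ++ pvT w ++ [' '], pvT [], (([] : List Char).length : Int)) := by
          simp [pvStep, pvT]
        calc (let r := (' ' :: cs).foldl pvStep (nn, pvT w, (w.length : Int)); r.1 ++ r.2.1)
            = (let r := cs.foldl pvStep (nn ++ pvT w ++ [' '], pvT [], (([] : List Char).length : Int)); r.1 ++ r.2.1) := by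
              rw [List.foldl_cons, step]
          _ = (nn ++ pvT w ++ [' ']) ++ PySem.Chars.join [' ']
                (((cs.splitOnP (· == ' ')).modifyHead (([] : List Char) ++ ·)).map pvT) := ih _ []
          _ = nn ++ PySem.Chars.join [' ']
                ((((' ' :: cs).splitOnP (· == ' ')).modifyHead (w ++ ·)).map pvT) := by
              rw [List.splitOnP_cons]
              simp only [ht]
              simp [PySem.Chars.join_cons_cons]
      · obtain ⟨h, t, ht⟩ := List.exists_cons_of_ne_nil (pv_splitOnP_ne_nil cs)
        calc (let r := ((c :: cs)).foldl pvStep (nn, pvT w, (w.length : Int)); r.1 ++ r.2.1)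
            = (let r := cs.foldl pvStep (nn, pvT (w ++ [c]), ((w ++ [c]).length : Int)); r.1 ++ r.2.1) := by
              rw [List.foldl_cons, pvStep_word w c hc]
          _ = nn ++ PySem.Chars.join [' ']
                (((cs.splitOnP (· == ' ')).modifyHead ((w ++ [c]) ++ ·)).map pvT) := ih _ _
          _ = nn ++ PySem.Chars.join [' ']
                ((((c :: cs).splitOnP (· == ' ')).modifyHead (w ++ ·)).map pvT) := by
              rw [List.splitOnP_cons]
              simp [ht, hc]

-- B's per-word function equals pvT
lemma pvTB_eq (w : List Char) :
    (if PySem.Chars.len w ≤ 5 then w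
     else PySem.Chars.slice w none (some 5) ++ ". ".toList) = pvT w := by
  have hs : PySem.List.slice w none (some (5 : Int)) = w.take 5 := by
    have := PySem.List.slice_to_natCast (xs := w) (b := 5)
    simpa using this
  rw [pvT, PySem.Chars.slice_eq_listSlice, hs, PySem.Chars.len_eq]
  by_cases h : w.length ≤ 5 <;>
    simp [h, show ((w.length : Int) ≤ 5) ↔ w.length ≤ 5 from by exact_mod_cast Iff.rfl]

-- ===== VERDICT (by name: the statement is the Claim_ definition above) =====
theorem get_course_title2_spec : Claim_equal_get_course_title2 := by
  intro name _
  show get_course_title2 name = get_course_title2_alt name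
  have h := pv_loop name.toList [] []
  simp only [pvT, List.length_nil, Nat.cast_zero, if_pos (by omega : (0:Nat) ≤ 5)] at h
  obtain ⟨hh, t, ht⟩ := List.exists_cons_of_ne_nil (pv_splitOnP_ne_nil name.toList)
  rw [ht] at h
  simp only [List.modifyHead, List.nil_append] at h
  have lhs : get_course_title2 name
      = String.ofList ((name.toList.foldl pvStep ([], [], (0:Int))).1
          ++ (name.toList.foldl pvStep ([], [], (0:Int))).2.1) := rfl
  have rhs : get_course_title2_alt name
      = String.ofList (PySem.Chars.join [' ']
          ((name.toList.splitOnP (· == ' ')).map pvT)) := by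
    unfold get_course_title2_alt
    rw [funext pvTB_eq, List.splitOn]
  rw [lhs, rhs, h, ht]
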